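-- pv_equiv track=rewrite | github.com/Unicorn/Unicorn.Gives | scripts/download-priority-assets.py | prioritize_pdfs
-- ===== SOURCE A (Python) =====
-- def prioritize_pdfs(pdf_refs):
--     """Prioritize PDFs by importance."""
--     priority = {
--         'forms': 1,  # Permit forms - critical
--         'ordinances': 2,  # Legal documents - important
--         'docs': 3,  # Various documents - useful
--         'archive': 4,  # Meeting minutes - archival
--     }
--
--     categorized = {}
--     for ref in pdf_refs:
--         category = ref.split('/')[0] if '/' in ref else 'root'
--         if category not in categorized:
--             categorized[category] = []
--         categorized[category].append(ref)
--
--     sorted_refs = []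
--     for cat in sorted(categorized.keys(), key=lambda x: priority.get(x, 999)):
--         sorted_refs.extend(categorized[cat])
--
--     return sorted_refs
-- ===== SOURCE B (Python) =====
-- def prioritize_pdfs(pdf_refs):
--     """Prioritize PDFs by importance."""
--     priority = {
--         'forms': 1,
--         'ordinances': 2,
--         'docs': 3,
--         'archive': 4,
--     }
--
--     def category(ref):
--         return ref.split('/')[0] if '/' in ref else 'root'
--
--     first_seen = {}
--     for ref in pdf_refs:
--         cat = category(ref)
--         if cat not in first_seen:
--             first_seen[cat] = len(first_seen)
--
--     return sorted(pdf_refs, key=lambda ref: (priority.get(category(ref), 999),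
--                                              first_seen[category(ref)]))
-- ===== Notes on version B (the rewrite author's own statement) =====
-- stated objective: alternative
-- what changed: B replaces A's group-into-per-category-lists-then-concatenate strategy with one pass that records each category's first-appearance index and a single stable sort of the whole list keyed by (priority, first-seen index).
import Mathlib
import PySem

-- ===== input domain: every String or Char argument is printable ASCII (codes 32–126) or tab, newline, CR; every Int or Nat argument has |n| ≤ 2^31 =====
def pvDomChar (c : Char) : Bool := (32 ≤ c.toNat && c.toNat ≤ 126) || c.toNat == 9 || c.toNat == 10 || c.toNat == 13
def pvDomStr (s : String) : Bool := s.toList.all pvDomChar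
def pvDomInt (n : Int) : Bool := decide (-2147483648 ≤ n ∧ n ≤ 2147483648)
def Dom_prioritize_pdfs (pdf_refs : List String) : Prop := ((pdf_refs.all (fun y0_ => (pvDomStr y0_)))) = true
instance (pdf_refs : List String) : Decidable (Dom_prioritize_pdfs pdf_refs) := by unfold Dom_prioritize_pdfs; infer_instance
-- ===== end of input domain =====

-- B replaces A's group-into-per-category-lists-then-concatenate strategy with a first-seen-index
-- pass plus one stable sort of the whole list keyed by (priority, category first-seen index).

-- shared helpers: both Pythons contain the identical expressions
-- "ref.split('/')[0] if '/' in ref else 'root'" and the priority dict literal.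
-- split with a nonempty separator never returns an empty list, so Python's [0] never raises; headD "" is exact here.
def pvCategory (ref : String) : String :=
  if PySem.Str.isIn "/" ref then (((PySem.Str.split? ref "/").getD []).headD "") else "root"

def pvPriority : PySem.Dict String Int :=
  PySem.Dict.ofList [("forms", 1), ("ordinances", 2), ("docs", 3), ("archive", 4)]

-- ===== PORT A =====
def prioritize_pdfs (pdf_refs : List String) : List String :=
  let categorized : PySem.Dict String (List String) :=
    pdf_refs.foldl (fun d ref => d.modify (pvCategory ref) [] (· ++ [ref])) PySem.Dict.empty
  let sortedCats := PySem.List.sorted categorized.keys (fun x => pvPriority.getD x 999) false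
  sortedCats.foldl (fun acc cat => acc ++ categorized.getD cat []) []

-- ===== PORT B =====
def prioritize_pdfs_alt (pdf_refs : List String) : List String :=
  let first_seen : PySem.Dict String Int :=
    pdf_refs.foldl (fun d ref =>
      let cat := pvCategory ref
      if d.contains cat then d else d.insert cat (d.size : Int)) PySem.Dict.empty
  -- first_seen[category(ref)]: the key is always present, so Python's [] lookup never raises; getD 0 is exact here
  PySem.List.sorted2 pdf_refs
    (fun ref => pvPriority.getD (pvCategory ref) 999)
    (fun ref => first_seen.getD (pvCategory ref) 0) false

-- ===== PRECONDITION & SPEC =====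
def Spec_prioritize_pdfs (pdf_refs : List String) (out : List String) : Prop := out = prioritize_pdfs_alt pdf_refs
instance (pdf_refs : List String) (out : List String) : Decidable (Spec_prioritize_pdfs pdf_refs out) := by unfold Spec_prioritize_pdfs; infer_instance

-- ===== CLAIM (what is proved, stated in full; the proofs are below) =====
def Claim_equal_prioritize_pdfs : Prop := ∀ (pdf_refs : List String), Dom_prioritize_pdfs pdf_refs → Spec_prioritize_pdfs pdf_refs (prioritize_pdfs pdf_refs)

-- ===== LEMMAS AND PROOFS =====

-- strict lexicographic order on (priority, tie-break) pairs, as a Bool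
def pvLexLtB (p q : Int × Int) : Bool :=
  decide (p.1 < q.1) || (decide (p.1 = q.1) && decide (p.2 < q.2))

theorem pvLexLtB_irrefl (p : Int × Int) : pvLexLtB p p = false := by
  simp [pvLexLtB]

theorem pvLexLtB_asymm {p q : Int × Int} (h : pvLexLtB p q = true) : pvLexLtB q p = false := by
  simp only [pvLexLtB, Bool.or_eq_true, Bool.and_eq_true, decide_eq_true_eq] at h
  simp only [pvLexLtB, Bool.or_eq_false_iff, Bool.and_eq_false_iff, decide_eq_false_iff_not]
  omega

theorem pvLexLtB_ne {p q : Int × Int} (h : pvLexLtB p q = true) : p ≠ q := by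
  intro he; rw [he, pvLexLtB_irrefl] at h; exact Bool.false_ne_true h

-- insertBy equation
theorem pv_insertBy_cons {α : Type} (bef : α → α → Bool) (x y : α) (ys : List α) :
    PySem.List.insertBy bef x (y :: ys) =
      if bef x y then x :: y :: ys else y :: PySem.List.insertBy bef x ys := rfl

theorem pv_insert_skip {α : Type} (bef : α → α → Bool) (x : α) (p R : List α)
    (h : ∀ y ∈ p, bef x y = false) :
    PySem.List.insertBy bef x (p ++ R) = p ++ PySem.List.insertBy bef x R := by
  induction p with
  | nil => simp only [List.nil_append]
  | cons y ys ih =>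
    rw [List.cons_append, pv_insertBy_cons, h y (by simp), if_neg (by simp),
      ih (fun z hz => h z (by simp [hz]))]
    simp

theorem pv_insert_front {α : Type} (bef : α → α → Bool) (x : α) (R : List α)
    (h : ∀ z ∈ R, bef x z = true) :
    PySem.List.insertBy bef x R = x :: R := by
  cases R with
  | nil => rfl
  | cons z zs => rw [pv_insertBy_cons, if_pos (h z (by simp))]

theorem pv_flatMap_congr {α β : Type} {l : List α} {f g : α → List β}
    (h : ∀ a ∈ l, f a = g a) : l.flatMap f = l.flatMap g := by
  induction l with
  | nil => simp
  | cons a t ih =>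
    simp only [List.flatMap_cons, h a (by simp), ih (fun b hb => h b (by simp [hb]))]

-- inserting one element into a list grouped by strictly pvLexLtB-increasing key values
theorem pv_insert_grouped {α : Type} (KK : α → Int × Int) (bef : α → α → Bool)
    (hbef : ∀ a b, bef a b = pvLexLtB (KK a) (KK b))
    (x : α) (vs : List (Int × Int)) (g : Int × Int → List α)
    (hvs : vs.Pairwise (fun p q => pvLexLtB p q = true))
    (hg : ∀ v ∈ vs, ∀ y ∈ g v, KK y = v)
    (hx : KK x ∈ vs) :
    PySem.List.insertBy bef x (vs.flatMap g) =
      vs.flatMap (fun v => g v ++ if KK x = v then [x] else []) := by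
  induction vs with
  | nil => simp at hx
  | cons v vs' ih =>
    rcases List.pairwise_cons.mp hvs with ⟨hhead, htail⟩
    simp only [List.flatMap_cons]
    rcases List.mem_cons.mp hx with hxv | hxv'
    · -- x belongs to the head group
      have hskip : ∀ y ∈ g v, bef x y = false := by
        intro y hy
        rw [hbef, hg v (by simp) y hy, hxv, pvLexLtB_irrefl]
      have hfront : ∀ z ∈ vs'.flatMap g, bef x z = true := by
        intro z hz
        rcases List.mem_flatMap.mp hz with ⟨w, hw, hzw⟩
        rw [hbef, hg w (by simp [hw]) z hzw, hxv]
        exact hhead w hw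
      have hne : ∀ w ∈ vs', ¬ (KK x = w) := by
        intro w hw heq
        exact pvLexLtB_ne (hhead w hw) (hxv ▸ heq)
      rw [pv_insert_skip bef x (g v) _ hskip, pv_insert_front bef x _ hfront, if_pos hxv,
        pv_flatMap_congr (l := vs') (f := fun w => g w ++ if KK x = w then [x] else []) (g := g)
          (fun w hw => by simp [hne w hw])]
      simp
    · -- x belongs to a later group
      have hvlt : pvLexLtB v (KK x) = true := hhead _ hxv'
      have hnev : ¬ (KK x = v) := fun heq => pvLexLtB_ne hvlt (heq.symm ▸ rfl)
      have hskip : ∀ y ∈ g v, bef x y = false := by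
        intro y hy
        rw [hbef, hg v (by simp) y hy]
        exact pvLexLtB_asymm hvlt
      rw [pv_insert_skip bef x (g v) _ hskip,
        ih htail (fun w hw y hy => hg w (by simp [hw]) y hy) hxv', if_neg hnev, List.append_nil]

-- canonical form of the Python stable insertion sort when the element key factors through
-- a strictly increasing value list vs covering all elements: the result is the
-- concatenation, over vs in order, of the original-order groups.
theorem pv_grouped {α : Type} (KK : α → Int × Int) (bef : α → α → Bool)
    (hbef : ∀ a b, bef a b = pvLexLtB (KK a) (KK b))
    (xs : List α) (vs : List (Int × Int))
    (hvs : vs.Pairwise (fun p q => pvLexLtB p q = true))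
    (hmem : ∀ x ∈ xs, KK x ∈ vs) :
    xs.foldl (fun acc x => PySem.List.insertBy bef x acc) [] =
      vs.flatMap (fun v => xs.filter (fun x => decide (KK x = v))) := by
  induction xs using List.reverseRecOn with
  | nil => simp
  | append_singleton ys x ih =>
    rw [List.foldl_append, List.foldl_cons, List.foldl_nil,
      ih (fun y hy => hmem y (by simp [hy])),
      pv_insert_grouped KK bef hbef x vs _ hvs
        (fun v hv y hy => of_decide_eq_true (List.mem_filter.mp hy).2)
        (hmem x (by simp))]
    apply pv_flatMap_congr
    intro v hv
    rw [List.filter_append, List.filter_singleton]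
    by_cases hx : KK x = v <;> simp [hx]

-- proof-only abbreviations for the two folds and derived data
def pvPrio (c : String) : Int := pvPriority.getD c 999

def pvCats (l : List String) : List String := PySem.Set.ofList (l.map pvCategory)

def pvFs (l : List String) : PySem.Dict String Int :=
  l.foldl (fun d ref =>
    let cat := pvCategory ref
    if d.contains cat then d else d.insert cat (d.size : Int)) PySem.Dict.empty

def pvCtz (l : List String) : PySem.Dict String (List String) :=
  l.foldl (fun d ref => d.modify (pvCategory ref) [] (· ++ [ref])) PySem.Dict.empty

def pvKB (l : List String) (c : String) : Int × Int := (pvPrio c, (pvFs l).getD c 0)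

def pvLA (l : List String) : List String := PySem.List.sorted (pvCats l) pvPrio false

-- the first_seen dict maps the k-th first-seen category to k
theorem pvFs_items (l : List String) :
    (pvFs l).items = (PySem.List.enumerate (pvCats l) 0).map (fun p => (p.2, p.1)) := by
  induction l using List.reverseRecOn with
  | nil => rfl
  | append_singleton ys r ih =>
    have hkeys : (pvFs ys).keys = pvCats ys := by
      simp only [PySem.Dict.keys, ih, List.map_map, Function.comp_def]
      exact PySem.List.map_snd_enumerate _ _
    have hsize : (pvFs ys).size = (pvCats ys).length := by
      simp only [PySem.Dict.size, ih, List.length_map, PySem.List.length_enumerate]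
    have hstep : pvFs (ys ++ [r]) =
        (if (pvFs ys).contains (pvCategory r) then pvFs ys
         else (pvFs ys).insert (pvCategory r) ((pvFs ys).size : Int)) := by
      simp only [pvFs, List.foldl_append, List.foldl_cons, List.foldl_nil]
    have hcats : pvCats (ys ++ [r]) = PySem.Set.add (pvCats ys) (pvCategory r) := by
      show PySem.Set.ofList ((ys ++ [r]).map pvCategory) = _
      rw [List.map_append, List.map_cons, List.map_nil, PySem.Set.ofList_append_singleton]
      rfl
    by_cases hc : (pvFs ys).contains (pvCategory r) = true
    · have hmem : pvCategory r ∈ pvCats ys := by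
        rw [← hkeys]; exact (PySem.Dict.contains_iff_mem_keys _ _).mp hc
      rw [hstep, if_pos hc, hcats, PySem.Set.add_of_mem hmem, ih]
    · have hnmem : pvCategory r ∉ pvCats ys := by
        rw [← hkeys]
        intro hmem
        exact hc ((PySem.Dict.contains_iff_mem_keys _ _).mpr hmem)
      rw [hstep, if_neg hc, hcats, PySem.Set.add_of_not_mem hnmem,
        PySem.Dict.items_insert_of_not_contains _ _ (by simpa using hc), ih, hsize,
        PySem.List.enumerate_append]
      simp [PySem.List.enumerate]

theorem pvFs_keys (l : List String) : (pvFs l).keys = pvCats l := by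
  simp only [PySem.Dict.keys, pvFs_items, List.map_map, Function.comp_def]
  exact PySem.List.map_snd_enumerate _ _

theorem pvFs_getD_idx (l : List String) (i : Nat) (h : i < (pvCats l).length) :
    (pvFs l).getD (pvCats l)[i] 0 = (i : Int) := by
  have he : i < ((PySem.List.enumerate (pvCats l) 0).map (fun p => (p.2, p.1))).length := by
    simp [PySem.List.length_enumerate, h]
  have hmem : ((pvCats l)[i], (i : Int)) ∈ (pvFs l).items := by
    rw [pvFs_items]
    have : ((PySem.List.enumerate (pvCats l) 0).map (fun p => (p.2, p.1)))[i] =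
        ((pvCats l)[i], (i : Int)) := by
      rw [List.getElem_map, PySem.List.getElem_enumerate]
      simp
    rw [← this]
    exact List.getElem_mem he
  exact PySem.Dict.getD_of_mem_items _ hmem (by rw [pvFs_keys]; exact PySem.Set.nodup_ofList _) 0

-- along the first-seen order, first_seen values strictly increase
theorem pvFs_pairwise (l : List String) :
    (pvCats l).Pairwise (fun a b => (pvFs l).getD a 0 < (pvFs l).getD b 0) := by
  rw [List.pairwise_iff_getElem]
  intro i j hi hj hij
  rw [pvFs_getD_idx l i hi, pvFs_getD_idx l j hj]
  exact_mod_cast hij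

-- first_seen is injective on the categories that occur
theorem pvFs_inj (l : List String) {a b : String} (ha : a ∈ pvCats l) (hb : b ∈ pvCats l)
    (h : (pvFs l).getD a 0 = (pvFs l).getD b 0) : a = b := by
  rcases List.mem_iff_getElem.mp ha with ⟨i, hi, rfl⟩
  rcases List.mem_iff_getElem.mp hb with ⟨j, hj, rfl⟩
  rw [pvFs_getD_idx l i hi, pvFs_getD_idx l j hj] at h
  have : i = j := by exact_mod_cast h
  subst this; rfl

theorem pvCtz_keys (l : List String) : (pvCtz l).keys = pvCats l := by
  rw [pvCtz, PySem.Dict.keys_foldl_modify_key l pvCategory [] (fun _ x => (· ++ [x]))]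
  simp [PySem.Set.update_nil_left, pvCats]

theorem pvCtz_getD (l : List String) (c : String) :
    (pvCtz l).getD c [] = l.filter (fun r => pvCategory r == c) := by
  rw [pvCtz, ← List.foldl_map (f := fun r => (pvCategory r, r))
    (g := fun (d : PySem.Dict String (List String)) p => d.modify p.1 [] (· ++ [p.2])),
    PySem.Dict.getD_foldl_modify_append]
  simp [List.filter_map, Function.comp_def]

-- A's stable category sort, characterised as priority groups in first-seen order
theorem pvLA_eq (l : List String) :
    pvLA l = ((PySem.List.sorted (PySem.Set.ofList ((pvCats l).map pvPrio)) (fun x => x) false).map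
        (fun p => (p, (0 : Int)))).flatMap
      (fun v => (pvCats l).filter (fun c => decide ((pvPrio c, (0 : Int)) = v))) := by
  refine pv_grouped (fun c => (pvPrio c, (0 : Int))) _ ?_ _ _ ?_ ?_
  · intro a b; simp [pvLexLtB]
  · rw [List.pairwise_map]
    refine (PySem.List.sorted_ofList_pairwise_lt _).imp ?_
    intro a b hab
    simp [pvLexLtB, hab]
  · intro c hc
    refine List.mem_map_of_mem ?_
    rw [PySem.List.mem_sorted, PySem.Set.mem_ofList]
    exact List.mem_map_of_mem hc

-- along A's sorted category list the (priority, first-seen) keys strictly increase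
theorem pvLA_pairwise (l : List String) :
    (pvLA l).Pairwise (fun a b => pvLexLtB (pvKB l a) (pvKB l b) = true) := by
  rw [pvLA_eq, List.pairwise_flatMap]
  constructor
  · intro v hv
    have hp : (List.filter (fun c => decide ((pvPrio c, (0 : Int)) = v)) (pvCats l)).Pairwise
        (fun a b => (pvFs l).getD a 0 < (pvFs l).getD b 0) :=
      List.Pairwise.sublist List.filter_sublist (pvFs_pairwise l)
    refine hp.imp_of_mem ?_
    intro a b ha hb hfs
    have hpa : pvPrio a = v.1 := by
      have := of_decide_eq_true (List.mem_filter.mp ha).2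
      exact congrArg Prod.fst this
    have hpb : pvPrio b = v.1 := by
      have := of_decide_eq_true (List.mem_filter.mp hb).2
      exact congrArg Prod.fst this
    simp [pvLexLtB, pvKB, hpa, hpb, hfs]
  · have hps : ((PySem.List.sorted (PySem.Set.ofList ((pvCats l).map pvPrio)) (fun x => x) false).map
        (fun p => (p, (0 : Int)))).Pairwise (fun v w => v.1 < w.1) := by
      rw [List.pairwise_map]
      exact (PySem.List.sorted_ofList_pairwise_lt _).imp (fun h => h)
    refine hps.imp_of_mem ?_
    intro v w hv hw hlt x hx y hy
    have hpx : pvPrio x = v.1 := by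
      have := of_decide_eq_true (List.mem_filter.mp hx).2
      exact congrArg Prod.fst this
    have hpy : pvPrio y = w.1 := by
      have := of_decide_eq_true (List.mem_filter.mp hy).2
      exact congrArg Prod.fst this
    simp [pvLexLtB, pvKB, hpx, hpy, hlt]

-- B, characterised as (priority, first-seen) groups over A's sorted category order
theorem pvB_eq (l : List String) :
    prioritize_pdfs_alt l = ((pvLA l).map (pvKB l)).flatMap
      (fun v => l.filter (fun r => decide (pvKB l (pvCategory r) = v))) := by
  have hfold : prioritize_pdfs_alt l = l.foldl (fun acc x => PySem.List.insertBy
      (fun a b => decide (pvPrio (pvCategory a) < pvPrio (pvCategory b)) ||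
        (!decide (pvPrio (pvCategory b) < pvPrio (pvCategory a)) &&
          decide ((pvFs l).getD (pvCategory a) 0 < (pvFs l).getD (pvCategory b) 0))) x acc) [] := rfl
  rw [hfold]
  refine pv_grouped (fun r => pvKB l (pvCategory r)) _ ?_ _ _ ?_ ?_
  · intro a b
    simp only [pvKB, pvLexLtB]
    by_cases h1 : pvPrio (pvCategory a) < pvPrio (pvCategory b) <;>
      by_cases h2 : pvPrio (pvCategory b) < pvPrio (pvCategory a) <;>
        by_cases h3 : (pvFs l).getD (pvCategory a) 0 < (pvFs l).getD (pvCategory b) 0 <;>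
          simp [h1, h2, h3] <;> omega
  · rw [List.pairwise_map]
    exact pvLA_pairwise l
  · intro r hr
    refine List.mem_map_of_mem ?_
    rw [pvLA, PySem.List.mem_sorted, pvCats, PySem.Set.mem_ofList]
    exact List.mem_map_of_mem hr

-- ===== VERDICT (by name: the statement is the Claim_ definition above) =====
theorem prioritize_pdfs_spec : Claim_equal_prioritize_pdfs := by
  intro l _
  show prioritize_pdfs l = prioritize_pdfs_alt l
  have hA : prioritize_pdfs l = (pvLA l).flatMap (fun c => l.filter (fun r => pvCategory r == c)) := by
    show (PySem.List.sorted (pvCtz l).keys (fun x => pvPriority.getD x 999) false).foldl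
        (fun acc cat => acc ++ (pvCtz l).getD cat []) [] = _
    rw [pvCtz_keys, PySem.List.foldl_append_eq_flatMap]
    simp only [List.nil_append]
    exact pv_flatMap_congr (fun c _ => pvCtz_getD l c)
  have hB : prioritize_pdfs_alt l = (pvLA l).flatMap (fun c => l.filter (fun r => pvCategory r == c)) := by
    rw [pvB_eq, List.flatMap_map]
    apply pv_flatMap_congr
    intro c hc
    apply List.filter_congr
    intro r hr
    have hcr : pvCategory r ∈ pvCats l := by
      rw [pvCats, PySem.Set.mem_ofList]; exact List.mem_map_of_mem hr
    have hcc : c ∈ pvCats l := by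
      rw [pvLA, PySem.List.mem_sorted] at hc; exact hc
    by_cases he : pvCategory r = c
    · simp [he]
    · have hne : pvKB l (pvCategory r) ≠ pvKB l c :=
        fun h => he (pvFs_inj l hcr hcc (congrArg Prod.snd h))
      simp [hne, he]
  rw [hA, hB]
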